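-- pv_equiv track=rewrite | github.com/JuanJoCH95/PythonBasico | Parcial 2/Punto2.py | mat_x
-- ===== SOURCE A (Python) =====
-- def mat_x(mat):
--     mat_resultado = []
--     s = len(mat)
--     pocisionD = 0
--     pocisionI = s
--
--     for i in range(s):
--         mat_resultado.append([])
--         pocisionI -= 1
--
--         for j in range(s):
--             if j == pocisionD or j == pocisionI:
--                 valor = 1
--             else:
--                 valor = 0
--
--             mat_resultado[i].append(valor)
--         pocisionD += 1
--
--     return mat_resultado
-- ===== SOURCE B (Python) =====
-- def mat_x(mat):
--     # Symmetry-based construction: build only the top half of the rows,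
--     # each as (unit row) OR (its reverse); bottom half is the mirrored prefix.
--     s = len(mat)
--     top = []
--     for i in range((s + 1) // 2):
--         e = [0] * i + [1] + [0] * (s - 1 - i)
--         top.append([x | y for x, y in zip(e, reversed(e))])
--     return top + top[: s // 2][::-1]
-- ===== Notes on version B (the rewrite author's own statement) =====
-- stated objective: alternative
-- what changed: B exploits the X pattern's vertical symmetry: it builds only the top ceil(s/2) rows, each as a unit row OR-ed elementwise with its own reverse, and produces the bottom half by mirroring (reversing) the prefix of the top rows, instead of A's full s-by-s double loop testing every cell.
import Mathlib
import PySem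

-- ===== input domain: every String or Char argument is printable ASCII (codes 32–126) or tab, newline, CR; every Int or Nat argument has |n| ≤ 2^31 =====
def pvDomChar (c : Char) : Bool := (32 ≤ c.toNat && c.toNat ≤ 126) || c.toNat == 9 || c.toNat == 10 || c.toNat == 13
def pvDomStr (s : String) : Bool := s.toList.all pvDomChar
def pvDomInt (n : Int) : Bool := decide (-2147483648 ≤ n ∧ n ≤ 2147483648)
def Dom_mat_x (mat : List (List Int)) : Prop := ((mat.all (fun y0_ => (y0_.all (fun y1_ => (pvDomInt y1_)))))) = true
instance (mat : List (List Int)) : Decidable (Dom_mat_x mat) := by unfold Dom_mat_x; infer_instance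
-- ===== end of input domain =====

-- B exploits the X pattern's symmetry: it builds only the top half of the rows,
-- each as a unit row OR-ed with its own reverse, and mirrors the prefix for the
-- bottom half; objective: alternative (same cost, different construction).

-- ===== PORT A =====
-- literal transliteration: outer loop appends a row built by the inner loop,
-- state (mat_resultado, pocisionD, pocisionI)
def mat_x (mat : List (List Int)) : List (List Int) :=
  let s : Int := (mat.length : Int)
  ((PySem.List.pyRange 0 s 1).foldl
    (fun (st : List (List Int) × Int × Int) _i =>
      let pI := st.2.2 - 1
      let row := (PySem.List.pyRange 0 s 1).foldl
        (fun row j => row ++ [if j = st.2.1 ∨ j = pI then (1 : Int) else 0]) []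
      (st.1 ++ [row], st.2.1 + 1, pI))
    ([], 0, s)).1

-- ===== PORT B =====
-- top half: row i = unit row e (1 at index i) OR-ed elementwise with reversed(e);
-- bottom half: mirrored prefix of the top rows
def mat_x_alt (mat : List (List Int)) : List (List Int) :=
  let s := mat.length
  let top := (List.range ((s + 1) / 2)).foldl
    (fun top i =>
      let e := List.replicate i (0 : Int) ++ [1] ++ List.replicate (s - 1 - i) 0
      top ++ [(e.zip e.reverse).map (fun (p : Int × Int) => PySem.Int.bor p.1 p.2)]) []
  top ++ (top.take (s / 2)).reverse

-- ===== PRECONDITION & SPEC =====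
def Spec_mat_x (mat : List (List Int)) (out : List (List Int)) : Prop := out = mat_x_alt mat
instance (mat : List (List Int)) (out : List (List Int)) : Decidable (Spec_mat_x mat out) := by unfold Spec_mat_x; infer_instance

-- ===== CLAIM (what is proved, stated in full; the proofs are below) =====
def Claim_equal_mat_x : Prop := ∀ (mat : List (List Int)), Dom_mat_x mat → Spec_mat_x mat (mat_x mat)

-- ===== LEMMAS AND PROOFS =====

-- the X-pattern row, the common normal form of both ports
def xrow (n i : Nat) : List Int :=
  (List.range n).map (fun j => if j = i ∨ j = n - 1 - i then 1 else 0)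

lemma foldl_push {α β : Type} (f : α → β) :
    ∀ (l : List α) (acc : List β),
      l.foldl (fun a x => a ++ [f x]) acc = acc ++ l.map f := by
  intro l
  induction l with
  | nil => simp
  | cons x xs ih => intro acc; simp [ih]

-- inner loop of A produces an xrow
lemma rowA_eq (n i : Nat) (hi : i < n) :
    (PySem.List.pyRange 0 (n : Int) 1).foldl
      (fun row j => row ++ [if j = (i : Int) ∨ j = (n : Int) - i - 1 then (1 : Int) else 0]) []
      = xrow n i := by
  rw [PySem.List.pyRange_zero_natCast, foldl_push]
  simp only [List.map_map, xrow, List.nil_append]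
  apply List.map_congr_left
  intro j hj
  simp only [List.mem_range] at hj
  simp only [Function.comp]
  have h : ((j : Int) = (i : Int) ∨ (j : Int) = (n : Int) - i - 1) ↔ (j = i ∨ j = n - 1 - i) := by
    constructor <;> intro h <;> rcases h with h | h
    · left; exact_mod_cast h
    · right; omega
    · left; exact_mod_cast h
    · right; omega
  exact if_congr h rfl rfl

-- outer loop of A: state after k iterations
lemma A_loop (N : Nat) : ∀ (k : Nat), k ≤ N →
    (PySem.List.pyRange 0 (k : Int) 1).foldl
      (fun (st : List (List Int) × Int × Int) _i =>
        let pI := st.2.2 - 1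
        let row := (PySem.List.pyRange 0 (N : Int) 1).foldl
          (fun row j => row ++ [if j = st.2.1 ∨ j = pI then (1 : Int) else 0]) []
        (st.1 ++ [row], st.2.1 + 1, pI))
      ([], 0, (N : Int))
    = ((List.range k).map (xrow N), (k : Int), (N : Int) - k) := by
  intro k
  induction k with
  | zero => intro _; simp [PySem.List.pyRange_zero_nat]
  | succ k ih =>
      intro hk
      rw [show ((k + 1 : Nat) : Int) = (k : Int) + 1 by push_cast; ring,
          PySem.List.pyRange_one_succ_right (by positivity),
          List.foldl_append, ih (by omega)]
      simp only [List.foldl_cons, List.foldl_nil]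
      have hrow := rowA_eq N k (by omega)
      rw [show (N : Int) - (k : Int) - 1 = (N : Int) - k - 1 by ring] at *
      rw [hrow]
      refine Prod.ext ?_ (Prod.ext ?_ ?_) <;> simp [List.range_succ] <;> (try push_cast) <;> (try ring)

lemma A_eq (mat : List (List Int)) :
    mat_x mat = (List.range mat.length).map (xrow mat.length) := by
  unfold mat_x
  simp only []
  rw [A_loop mat.length mat.length le_rfl]

-- the unit row as a map over range
lemma unit_eq (a b : Nat) :
    List.replicate a (0 : Int) ++ 1 :: List.replicate b 0
      = (List.range (a + 1 + b)).map (fun j => if j = a then 1 else 0) := by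
  induction a with
  | zero =>
      rw [show 0 + 1 + b = b + 1 by omega, List.range_succ_eq_map]
      simp only [List.replicate, List.nil_append, List.map_cons, List.map_map]
      refine List.cons_eq_cons.mpr ⟨by simp, ?_⟩
      symm
      rw [List.eq_replicate_iff]
      refine ⟨by simp, ?_⟩
      intro x hx
      simp only [List.mem_map, Function.comp] at hx
      obtain ⟨j, _, hj⟩ := hx
      simpa using hj.symm
  | succ a ih =>
      rw [show a + 1 + 1 + b = (a + 1 + b) + 1 by omega, List.range_succ_eq_map]
      simp only [List.replicate_succ, List.cons_append, List.map_cons, List.map_map]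
      refine List.cons_eq_cons.mpr ⟨by simp, ?_⟩
      rw [ih]
      apply List.map_congr_left
      intro j _
      by_cases h : j = a
      · simp [Function.comp, h]
      · simp only [Function.comp_apply]
        rw [if_neg h, if_neg (by omega)]

lemma unit_eq' (s i : Nat) (hi : i < s) :
    List.replicate i (0 : Int) ++ 1 :: List.replicate (s - 1 - i) 0
      = (List.range s).map (fun j => if j = i then 1 else 0) := by
  have h := unit_eq i (s - 1 - i)
  rwa [show i + 1 + (s - 1 - i) = s by omega] at h

-- row of B's top loop is an xrow
lemma rowB_eq (s i : Nat) (hi : i < s) :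
    (((List.replicate i (0 : Int) ++ [1] ++ List.replicate (s - 1 - i) 0).zip
      (List.replicate i (0 : Int) ++ [1] ++ List.replicate (s - 1 - i) 0).reverse).map
      (fun (p : Int × Int) => PySem.Int.bor p.1 p.2)) = xrow s i := by
  have he : List.replicate i (0 : Int) ++ [1] ++ List.replicate (s - 1 - i) 0
      = (List.range s).map (fun j => if j = i then 1 else 0) := by
    rw [List.append_assoc]; exact unit_eq' s i hi
  have hr : (List.replicate i (0 : Int) ++ [1] ++ List.replicate (s - 1 - i) 0).reverse
      = (List.range s).map (fun j => if j = s - 1 - i then 1 else 0) := by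
    rw [List.append_assoc]
    simp only [List.reverse_append, List.reverse_cons, List.reverse_nil,
      List.reverse_replicate, List.nil_append]
    have h := unit_eq' s (s - 1 - i) (by omega)
    rw [show s - 1 - (s - 1 - i) = i by omega] at h
    simpa using h
  rw [hr, he, List.zip_map', List.map_map]
  unfold xrow
  apply List.map_congr_left
  intro j hj
  simp only [List.mem_range] at hj
  simp only [Function.comp]
  by_cases h1 : j = i <;> by_cases h2 : j = s - 1 - i <;> simp [h1, h2] <;> split_ifs <;> decide

lemma B_eq (mat : List (List Int)) :
    mat_x_alt mat = (List.range mat.length).map (xrow mat.length) := by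
  unfold mat_x_alt
  set s := mat.length with hs
  simp only []
  rw [foldl_push, List.nil_append]
  have htop : (List.range ((s + 1) / 2)).map
      (fun i => ((List.replicate i (0 : Int) ++ [1] ++ List.replicate (s - 1 - i) 0).zip
        (List.replicate i (0 : Int) ++ [1] ++ List.replicate (s - 1 - i) 0).reverse).map
        (fun (p : Int × Int) => PySem.Int.bor p.1 p.2))
      = (List.range ((s + 1) / 2)).map (xrow s) := by
    apply List.map_congr_left
    intro i hi
    simp only [List.mem_range] at hi
    exact rowB_eq s i (by omega)
  rw [htop, ← List.map_take, List.take_range, show min (s / 2) ((s + 1) / 2) = s / 2 by omega]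
  apply List.ext_getElem
  · simp; omega
  · intro k h1 h2
    simp only [List.length_append, List.length_map, List.length_range, List.length_reverse] at h1
    simp only [List.length_map, List.length_range] at h2
    by_cases hk : k < (s + 1) / 2
    · rw [List.getElem_append_left (by simpa using hk)]
      simp
    · rw [List.getElem_append_right (by simpa using hk)]
      simp only [List.length_map, List.length_range, List.getElem_reverse,
        List.getElem_map, List.getElem_range]
      rw [show s / 2 - 1 - (k - (s + 1) / 2) = s - 1 - k by omega]
      unfold xrow
      apply List.map_congr_left
      intro t ht
      simp only [List.mem_range] at ht
      apply if_congr _ rfl rfl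
      constructor <;> intro h <;> rcases h with h | h <;> omega

-- ===== VERDICT (by name: the statement is the Claim_ definition above) =====
theorem mat_x_spec : Claim_equal_mat_x := by
  intro mat _
  unfold Spec_mat_x
  rw [A_eq, B_eq]
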